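-- pv_equiv track=rewrite | github.com/acheshkov/qa_concept_model | mk-vocab.py | mkVocab
-- ===== SOURCE A (Python) =====
-- def mkVocab(iterator):
--
--     vocabulary = {}
--
--     for (word, context) in iterator:
--
--         if (word not in vocabulary):
--             i = vocabulary.setdefault(word, (len(vocabulary), 1))
--         else:
--             idx, freq = vocabulary[word]
--             vocabulary[word] = (idx, freq + 1)
--
--     return vocabulary
-- ===== SOURCE B (Python) =====
-- def mkVocab(iterator):
--     # Two-phase decomposition: count all words first, then assign indices by
--     # enumerating the counts dict (insertion order = first-appearance order).
--     words = [word for (word, context) in iterator]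
--     counts = {}
--     for w in words:
--         counts[w] = counts.get(w, 0) + 1
--     return {w: (i, c) for i, (w, c) in enumerate(counts.items())}
-- ===== Notes on version B (the rewrite author's own statement) =====
-- stated objective: idiomatic
-- what changed: Replaces A's single-pass insert-or-increment (which stores index and frequency together and patches tuples in place) by a count-first then enumerate-second decomposition: one pass builds a plain counts dict, a second pass assigns indices via enumerate over its items.
import Mathlib
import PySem

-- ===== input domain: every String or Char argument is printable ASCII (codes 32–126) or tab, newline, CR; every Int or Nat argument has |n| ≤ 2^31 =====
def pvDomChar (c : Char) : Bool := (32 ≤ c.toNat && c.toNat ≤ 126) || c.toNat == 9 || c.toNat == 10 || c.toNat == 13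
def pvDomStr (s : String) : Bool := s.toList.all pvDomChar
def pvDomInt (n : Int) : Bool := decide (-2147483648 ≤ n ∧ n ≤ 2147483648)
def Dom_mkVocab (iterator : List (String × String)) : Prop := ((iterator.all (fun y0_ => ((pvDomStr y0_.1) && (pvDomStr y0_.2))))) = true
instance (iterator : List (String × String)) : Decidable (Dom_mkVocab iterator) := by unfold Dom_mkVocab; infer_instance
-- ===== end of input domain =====

-- B replaces A's single-pass insert-or-increment with an idiomatic count-first,
-- enumerate-second decomposition (same cost; equivalence of the return value proved below).

-- ===== PORT A =====
-- single pass: insert (len, 1) for a new word, else bump the stored frequency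
def mkVocab (iterator : List (String × String)) : List (String × Int × Int) :=
  (iterator.foldl
    (fun (vocab : PySem.Dict String (Int × Int)) wc =>
      if vocab.contains wc.1 = false then
        vocab.setdefault wc.1 ((vocab.size : Int), 1)
      else
        match vocab.get? wc.1 with
        | some (idx, freq) => vocab.insert wc.1 (idx, freq + 1)
        | none => vocab   -- unreachable: contains is true in this branch
    ) PySem.Dict.empty).items

-- ===== PORT B =====
-- phase 1: counts dict; phase 2: dict comprehension over enumerate(counts.items())
def mkVocab_alt (iterator : List (String × String)) : List (String × Int × Int) :=
  let words := iterator.map (fun p => p.1)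
  let counts := words.foldl
    (fun (d : PySem.Dict String Int) w => d.insert w (d.getD w 0 + 1)) PySem.Dict.empty
  ((PySem.List.enumerate counts.items 0).foldl
    (fun (d : PySem.Dict String (Int × Int)) p => d.insert p.2.1 (p.1, p.2.2))
    PySem.Dict.empty).items

-- ===== PRECONDITION & SPEC =====
def Spec_mkVocab (iterator : List (String × String)) (out : List (String × Int × Int)) : Prop := out = mkVocab_alt iterator
instance (iterator : List (String × String)) (out : List (String × Int × Int)) : Decidable (Spec_mkVocab iterator out) := by unfold Spec_mkVocab; infer_instance

-- ===== CLAIM (what is proved, stated in full; the proofs are below) =====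
def Claim_equal_mkVocab : Prop := ∀ (iterator : List (String × String)), Dom_mkVocab iterator → Spec_mkVocab iterator (mkVocab iterator)

-- ===== LEMMAS AND PROOFS =====

-- the closed form both ports reach: the i-th distinct word (first-appearance order)
-- maps to (i, its count in the word list)
def cfItems (ws : List String) : List (String × Int × Int) :=
  (PySem.List.enumerate (PySem.Set.ofList ws) 0).map
    (fun p => (p.2, p.1, (ws.count p.2 : Int)))

theorem mem_snd_enumerate {α : Type} {p : Int × α} {xs : List α} {s : Int}
    (h : p ∈ PySem.List.enumerate xs s) : p.2 ∈ xs := by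
  have := PySem.List.map_snd_enumerate xs s
  exact this ▸ List.mem_map_of_mem h

theorem enum_snd_inj {α : Type} {xs : List α} {s : Int} (hnd : xs.Nodup)
    {p q : Int × α} (hp : p ∈ PySem.List.enumerate xs s)
    (hq : q ∈ PySem.List.enumerate xs s) (h2 : p.2 = q.2) : p = q := by
  induction xs generalizing s with
  | nil => simp [PySem.List.enumerate] at hp
  | cons x xs ih =>
    rw [PySem.List.enumerate_cons] at hp hq
    rcases List.mem_cons.mp hp with hp | hp <;> rcases List.mem_cons.mp hq with hq | hq
    · rw [hp, hq]
    · exact absurd (show x ∈ xs by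
        rw [show x = q.2 from by rw [← h2, hp]]; exact mem_snd_enumerate hq)
        (List.nodup_cons.mp hnd).1
    · exact absurd (show x ∈ xs by
        rw [show x = p.2 from by rw [h2, hq]]; exact mem_snd_enumerate hp)
        (List.nodup_cons.mp hnd).1
    · exact ih (List.nodup_cons.mp hnd).2 hp hq

theorem enumerate_map {α β : Type} (g : α → β) (xs : List α) (s : Int) :
    PySem.List.enumerate (xs.map g) s
      = (PySem.List.enumerate xs s).map (fun p => (p.1, g p.2)) := by
  induction xs generalizing s with
  | nil => simp [PySem.List.enumerate]
  | cons x xs ih => simp [PySem.List.enumerate_cons, ih]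

theorem keys_cf (ws : List String) :
    (PySem.Dict.mk (cfItems ws)).keys = PySem.Set.ofList ws := by
  show (cfItems ws).map (fun p => p.1) = _
  unfold cfItems
  rw [List.map_map]
  exact PySem.List.map_snd_enumerate _ _

theorem B_cf (it : List (String × String)) : mkVocab_alt it = cfItems (it.map (fun p => p.1)) := by
  unfold mkVocab_alt
  set ws := it.map (fun p => p.1) with hws
  show ((PySem.List.enumerate
      (List.foldl (fun (d : PySem.Dict String Int) w => d.insert w (d.getD w 0 + 1)) PySem.Dict.empty ws).items 0).foldl
      (fun (d : PySem.Dict String (Int × Int)) p => d.insert p.2.1 (p.1, p.2.2)) PySem.Dict.empty).items = cfItems ws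
  rw [PySem.Dict.foldl_insert_getD_add_one_eq_counter]
  rw [show (PySem.Dict.counter ws).items = (PySem.Set.ofList ws).map (fun k => (k, (ws.count k : Int))) from PySem.Dict.items_counter ws]
  rw [enumerate_map]
  have hfresh : ∀ a ∈ ((PySem.List.enumerate (PySem.Set.ofList ws) 0).map (fun p => (p.1, p.2, (ws.count p.2 : Int)))), (PySem.Dict.empty : PySem.Dict String (Int × Int)).contains ((fun (p : Int × String × Int) => p.2.1) a) = false := by
    intro a _; exact PySem.Dict.contains_empty _
  have hnodup : (((PySem.List.enumerate (PySem.Set.ofList ws) 0).map (fun p => (p.1, p.2, (ws.count p.2 : Int)))).map (fun (p : Int × String × Int) => p.2.1)).Nodup := by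
    rw [List.map_map]
    rw [show ((fun (p : Int × String × Int) => p.2.1) ∘ fun (p : Int × String) => (p.1, p.2, (ws.count p.2 : Int))) = (fun (p : Int × String) => p.2) from rfl]
    rw [PySem.List.map_snd_enumerate]
    exact PySem.Set.nodup_ofList ws
  rw [PySem.Dict.items_foldl_insert_fresh _ (fun (p : Int × String × Int) => p.2.1) (fun p => (p.1, p.2.2)) _ hfresh hnodup]
  rw [List.map_map]
  unfold cfItems
  rfl

theorem step_cf (ws : List String) (w : String) :
    (if (PySem.Dict.mk (cfItems ws)).contains w = false then
      (PySem.Dict.mk (cfItems ws)).setdefault w (((PySem.Dict.mk (cfItems ws)).size : Int), 1)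
    else
      match (PySem.Dict.mk (cfItems ws)).get? w with
      | some (idx, freq) => (PySem.Dict.mk (cfItems ws)).insert w (idx, freq + 1)
      | none => PySem.Dict.mk (cfItems ws))
    = PySem.Dict.mk (cfItems (ws ++ [w])) := by
  have hnd : (PySem.Dict.mk (cfItems ws)).keys.Nodup := by
    rw [keys_cf]; exact PySem.Set.nodup_ofList ws
  have hcont : (PySem.Dict.mk (cfItems ws)).contains w = decide (w ∈ ws) := by
    rw [PySem.Dict.contains_eq_decide_mem_keys, keys_cf]
    simp [PySem.Set.mem_ofList]
  by_cases hw : w ∈ ws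
  · -- existing word: frequency bump
    have hc : (PySem.Dict.mk (cfItems ws)).contains w = true := by simp [hcont, hw]
    simp only [hc]
    obtain ⟨v, hv⟩ : ∃ v, (PySem.Dict.mk (cfItems ws)).get? w = some v := by
      have := PySem.Dict.contains_eq_isSome_get? (PySem.Dict.mk (cfItems ws)) w
      rw [hc] at this
      exact Option.isSome_iff_exists.mp this.symm
    obtain ⟨idx, freq⟩ := v
    have hmem : (w, (idx, freq)) ∈ cfItems ws :=
      (PySem.Dict.get?_eq_some_iff_mem_items _ _ _ hnd).mp hv
    unfold cfItems at hmem
    obtain ⟨p0, hp0, hpe⟩ := List.mem_map.mp hmem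
    obtain ⟨he2, he1, hef⟩ : p0.2 = w ∧ p0.1 = idx ∧ (ws.count p0.2 : Int) = freq := by
      refine ⟨congrArg Prod.fst hpe, ?_, ?_⟩
      · exact congrArg (fun q => q.2.1) hpe
      · exact congrArg (fun q => q.2.2) hpe
    simp only [hv]
    apply PySem.Dict.ext
    rw [if_neg (by decide)]
    rw [PySem.Dict.items_insert_of_contains _ _ hc]
    show List.map _ (cfItems ws) = cfItems (ws ++ [w])
    unfold cfItems
    rw [show PySem.Set.ofList (ws ++ [w]) = PySem.Set.ofList ws from by
      rw [PySem.Set.ofList_append_singleton, PySem.Set.add_of_mem (by rw [PySem.Set.mem_ofList]; exact hw)]]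
    rw [List.map_map]
    apply List.map_congr_left
    intro p hp
    by_cases hpw : p.2 = w
    · have hpp : p = p0 := enum_snd_inj (PySem.Set.nodup_ofList ws) hp hp0 (by rw [hpw, he2])
      have hfw : (List.count w ws : Int) = freq := he2 ▸ hef
      simp only [Function.comp, hpw, beq_self_eq_true, if_true]
      rw [List.count_append, hpp, he1]
      have h1 : (List.count w ws + List.count w [w] : Nat) = List.count w ws + 1 := by simp
      rw [h1]
      push_cast
      rw [hfw]
    · simp only [Function.comp, beq_iff_eq, hpw, if_false]
      rw [List.count_append]
      have : List.count p.2 [w] = 0 := by simp [List.count_singleton]; exact fun h => hpw h.symm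
      simp [this]
  · -- new word: append (len, 1)
    have hc : (PySem.Dict.mk (cfItems ws)).contains w = false := by simp [hcont, hw]
    simp only [hc]
    rw [PySem.Dict.setdefault_of_not_contains _ _ hc]
    apply PySem.Dict.ext
    rw [if_pos trivial]
    rw [PySem.Dict.items_insert_of_not_contains _ _ hc]
    show cfItems ws ++ [(w, ((PySem.Dict.mk (cfItems ws)).size : Int), 1)] = cfItems (ws ++ [w])
    have hsize : (PySem.Dict.mk (cfItems ws)).size = (PySem.Set.ofList ws).length := by
      show (cfItems ws).length = _
      unfold cfItems
      rw [List.length_map, PySem.List.length_enumerate]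
    rw [hsize]
    unfold cfItems
    rw [show PySem.Set.ofList (ws ++ [w]) = PySem.Set.ofList ws ++ [w] from by
      rw [PySem.Set.ofList_append_singleton, PySem.Set.add_of_not_mem (by rw [PySem.Set.mem_ofList]; exact hw)]]
    rw [PySem.List.enumerate_append, List.map_append]
    congr 1
    · apply List.map_congr_left
      intro p hp
      have hpw : p.2 ≠ w := fun h => hw (h ▸ (PySem.Set.mem_ofList _ _).mp (mem_snd_enumerate hp))
      rw [List.count_append]
      have : List.count p.2 [w] = 0 := by simp [List.count_singleton]; exact fun h => hpw h.symm
      simp [this]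
    · show _ = List.map _ (PySem.List.enumerate [w] (0 + ((PySem.Set.ofList ws).length : Int)))
      rw [PySem.List.enumerate_cons, PySem.List.enumerate_nil]
      simp only [List.map_cons, List.map_nil]
      rw [List.count_append]
      simp [List.count_eq_zero_of_not_mem hw]

theorem A_loop (it : List (String × String)) (ws : List String) :
    it.foldl
      (fun (vocab : PySem.Dict String (Int × Int)) wc =>
        if vocab.contains wc.1 = false then
          vocab.setdefault wc.1 ((vocab.size : Int), 1)
        else
          match vocab.get? wc.1 with
          | some (idx, freq) => vocab.insert wc.1 (idx, freq + 1)
          | none => vocab) (PySem.Dict.mk (cfItems ws))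
    = PySem.Dict.mk (cfItems (ws ++ it.map (fun p => p.1))) := by
  induction it generalizing ws with
  | nil => simp
  | cons wc it ih =>
    rw [List.foldl_cons, step_cf ws wc.1, ih (ws ++ [wc.1])]
    simp

theorem A_cf (it : List (String × String)) : mkVocab it = cfItems (it.map (fun p => p.1)) := by
  unfold mkVocab
  rw [show (PySem.Dict.empty : PySem.Dict String (Int × Int)) = PySem.Dict.mk (cfItems []) from rfl]
  rw [A_loop it []]
  simp

-- ===== VERDICT (by name: the statement is the Claim_ definition above) =====
theorem mkVocab_spec : Claim_equal_mkVocab := by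
  intro it _
  show mkVocab it = mkVocab_alt it
  rw [A_cf, B_cf]
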